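-- pv_equiv track=rewrite | github.com/keephq/keep | keep/topologies/topologies_service.py | _find_connected_services
-- ===== SOURCE A (Python) =====
-- from collections import defaultdict, deque
-- from typing import Dict, List, Optional, Set
--
-- def _find_connected_services(
--     graph: Dict[str, Set[str]],
--     start_service: str,
--     max_depth: int,
--     services_list: List[str],
-- ) -> Set[str]:
--     """
--     BFS to find all services connected to start_service within max_depth.
--     """
--     connected = {start_service}
--     queue = deque([(start_service, 0)])  # (service, depth)
--     visited = {start_service}
--
--     while queue:
--         current, depth = queue.popleft()
--
--         # If we reached max depth, don't explore further
--         if depth >= max_depth: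
--             continue
--
--         for neighbor in graph.get(current, set()):
--             if neighbor not in visited:
--                 visited.add(neighbor)
--
--                 # Only include services in the allowed list
--                 if neighbor in services_list:
--                     connected.add(neighbor)
--
--                 # Enqueue neighbor for further exploration
--                 queue.append((neighbor, depth + 1))
--
--     return connected
-- ===== SOURCE B (Python) =====
-- def _find_connected_services(
--     graph,
--     start_service,
--     max_depth,
--     services_list,
-- ):
--     """
--     Round-based reachability closure: repeatedly replace the reachable set by
--     itself plus the neighbours of ALL its members (at most max_depth rounds,
--     stopping at a fixpoint), then filter by the allowed list in one final pass.
--     No queue, no frontier, no per-node visited/connected bookkeeping.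
--     """
--     reachable = {start_service}
--     for _ in range(max_depth):
--         new = {n for s in reachable for n in graph.get(s, set()) if n not in reachable}
--         if not new:
--             break
--         reachable |= new
--     return {start_service} | {n for n in reachable if n in services_list}
-- ===== Notes on version B (the rewrite author's own statement) =====
-- stated objective: alternative
-- what changed: BFS with a (node,depth) queue and interleaved visited/connected bookkeeping is replaced by a round-based reachability closure (repeatedly add the neighbours of the whole current reachable set until a fixpoint or max_depth rounds) followed by one final filtering pass over the reachable set.
import Mathlib
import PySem

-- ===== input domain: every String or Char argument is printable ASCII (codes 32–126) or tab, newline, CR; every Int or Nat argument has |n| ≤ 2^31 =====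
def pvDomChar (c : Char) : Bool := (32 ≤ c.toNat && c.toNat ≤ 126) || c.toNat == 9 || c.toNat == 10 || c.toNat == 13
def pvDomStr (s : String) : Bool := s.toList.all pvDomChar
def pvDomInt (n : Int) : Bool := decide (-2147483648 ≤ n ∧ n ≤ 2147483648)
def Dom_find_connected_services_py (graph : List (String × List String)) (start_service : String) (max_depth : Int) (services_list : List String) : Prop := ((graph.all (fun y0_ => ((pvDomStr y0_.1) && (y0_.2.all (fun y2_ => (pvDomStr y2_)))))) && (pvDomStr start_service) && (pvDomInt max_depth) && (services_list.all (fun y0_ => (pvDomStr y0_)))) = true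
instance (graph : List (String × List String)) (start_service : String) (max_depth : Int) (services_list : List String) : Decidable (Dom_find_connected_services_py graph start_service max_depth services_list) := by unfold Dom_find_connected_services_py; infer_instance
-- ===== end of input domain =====

-- B replaces A's (node, depth)-queue BFS with interleaved visited/connected bookkeeping by a
-- round-based reachability closure (expand the neighbours of the WHOLE reachable set, at most
-- max_depth rounds, stop at a fixpoint) followed by one final filtering pass; objective: alternative.
-- The Python return value is a set; its list representation here is in first-insertion order.

-- ===== PORT A =====

-- graph.get(current, set())  (first-match association-list lookup)
def pvNbrs (graph : List (String × List String)) (s : String) : List String :=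
  (PySem.Dict.mk graph).getD s []

-- number of strings in u not yet visited (termination measure only)
def pvUnvis (u v : List String) : Nat :=
  (u.filter (fun s => !v.contains s)).length

theorem pvFilterLenMono {α : Type} (u : List α) (p q : α → Bool)
    (h : ∀ a, q a = true → p a = true) :
    (u.filter q).length ≤ (u.filter p).length :=
  List.Sublist.length_le (List.monotone_filter_right u h)

theorem pvFilterLenStrict {α : Type} (u : List α) (p q : α → Bool)
    (h : ∀ a, q a = true → p a = true) (n : α) (hn : n ∈ u)
    (hp : p n = true) (hq : q n = false) :
    (u.filter q).length + 1 ≤ (u.filter p).length := by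
  induction u with
  | nil => simp at hn
  | cons x xs ih =>
    simp only [List.filter_cons]
    rcases List.mem_cons.mp hn with hx | hx
    · subst hx
      simp only [hp, hq, if_true, Bool.false_eq_true, if_false, List.length_cons]
      have := pvFilterLenMono xs p q h
      omega
    · have := ih hx
      by_cases hqx : q x = true
      · simp [hqx, h x hqx, this]
      · simp only [Bool.not_eq_true] at hqx
        simp only [hqx, Bool.false_eq_true, if_false]
        by_cases hpx : p x = true
        · simp only [hpx, if_true, List.length_cons]; omega
        · simp only [Bool.not_eq_true] at hpx
          simp only [hpx, Bool.false_eq_true, if_false]; omega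

theorem pvUnvis_append_lt (u v : List String) (n : String) (hn : n ∈ u) (hnv : n ∉ v) :
    pvUnvis u (v ++ [n]) + 1 ≤ pvUnvis u v := by
  refine pvFilterLenStrict u _ _ ?_ n hn ?_ ?_
  · intro a ha
    simp only [Bool.not_eq_true', List.contains_eq_mem, decide_eq_false_iff_not,
      List.mem_append, List.mem_singleton] at ha ⊢
    tauto
  · simpa using hnv
  · simp

-- body of A's inner 'for neighbor in graph.get(current, set())' loop; state (connected, visited, queue)
def pvInnerA (services_list : List String) (depth : Int)
    (st : List String × List String × List (String × Int)) (n : String) :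
    List String × List String × List (String × Int) :=
  if st.2.1.contains n then st
  else
    (if services_list.contains n then PySem.Set.add st.1 n else st.1,
     PySem.Set.add st.2.1 n,
     st.2.2 ++ [(n, depth + 1)])

theorem pvInnerA_meas (services_list : List String) (depth : Int) (u : List String) :
    ∀ (ns : List String) (c v : List String) (q : List (String × Int)),
      (∀ n ∈ ns, n ∈ u) →
      (ns.foldl (pvInnerA services_list depth) (c, v, q)).2.2.length
        + pvUnvis u (ns.foldl (pvInnerA services_list depth) (c, v, q)).2.1
        ≤ q.length + pvUnvis u v := by
  intro ns
  induction ns with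
  | nil => intro c v q _; simp
  | cons n ns ih =>
    intro c v q hsub
    have hn : n ∈ u := hsub n (by simp)
    have hrest : ∀ m ∈ ns, m ∈ u := fun m hm => hsub m (by simp [hm])
    simp only [List.foldl_cons]
    by_cases hc : v.contains n = true
    · simp only [pvInnerA, hc, if_true]
      exact ih c v q hrest
    · simp only [Bool.not_eq_true] at hc
      have hnv : n ∉ v := by simpa using hc
      simp only [pvInnerA, hc, Bool.false_eq_true, if_false]
      have h1 := ih (if services_list.contains n then PySem.Set.add c n else c)
                    (PySem.Set.add v n) (q ++ [(n, depth + 1)]) hrest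
      have h2 : pvUnvis u (PySem.Set.add v n) + 1 ≤ pvUnvis u v := by
        rw [PySem.Set.add_of_not_mem hnv]
        exact pvUnvis_append_lt u v n hn hnv
      simp only [List.length_append, List.length_cons, List.length_nil] at h1
      omega

theorem pvNbrs_subset (graph : List (String × List String)) (s : String) :
    ∀ n ∈ pvNbrs graph s, n ∈ (graph.map Prod.snd).flatten := by
  intro n hn
  simp only [pvNbrs, PySem.Dict.getD_eq_get?_getD] at hn
  cases hget : (PySem.Dict.mk graph).get? s with
  | none => simp [hget] at hn
  | some ns =>
    simp only [hget, Option.getD_some] at hn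
    have hmem : (s, ns) ∈ (PySem.Dict.mk graph).items := PySem.Dict.mem_items_of_get?_eq_some _ hget
    have : ns ∈ graph.map Prod.snd := by
      simp only [List.mem_map]
      exact ⟨(s, ns), hmem, rfl⟩
    exact List.mem_flatten.mpr ⟨ns, this, hn⟩

-- the 'while queue:' loop of A; state (connected, visited, queue of (service, depth))
def pvLoopA (graph : List (String × List String)) (max_depth : Int) (services_list : List String) :
    List String → List String → List (String × Int) → List String
  | c, _, [] => c
  | c, v, (cur, depth) :: rest =>
    if max_depth ≤ depth then
      pvLoopA graph max_depth services_list c v rest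
    else
      let st := (pvNbrs graph cur).foldl (pvInnerA services_list depth) (c, v, rest)
      pvLoopA graph max_depth services_list st.1 st.2.1 st.2.2
termination_by _ v q => q.length + pvUnvis ((graph.map Prod.snd).flatten) v
decreasing_by
  · simp only [List.length_cons]; omega
  · have := pvInnerA_meas services_list depth ((graph.map Prod.snd).flatten)
      (pvNbrs graph cur) c v rest (pvNbrs_subset graph cur)
    simp only [List.length_cons]
    omega

def find_connected_services_py (graph : List (String × List String)) (start_service : String) (max_depth : Int) (services_list : List String) : List String :=
  pvLoopA graph max_depth services_list [start_service] [start_service] [(start_service, 0)]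

-- ===== PORT B =====

-- one candidate of B's set comprehension: 'n for … if n not in reachable' into the set 'new'
def pvInnerC (reachable : List String) (new : List String) (n : String) : List String :=
  if reachable.contains n then new else PySem.Set.add new n

-- the per-source part of the comprehension: all candidates drawn from graph.get(s, set())
def pvRoundStep (graph : List (String × List String)) (reachable : List String)
    (new : List String) (s : String) : List String :=
  (pvNbrs graph s).foldl (pvInnerC reachable) new

-- new = {n for s in reachable for n in graph.get(s, set()) if n not in reachable}
def pvRound (graph : List (String × List String)) (reachable : List String) : List String :=
  reachable.foldl (pvRoundStep graph reachable) []

-- 'for _ in range(max_depth)' with the fixpoint break; 'reachable |= new' is a set update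
def pvLoopC (graph : List (String × List String)) : Nat → List String → List String
  | 0, r => r
  | k + 1, r =>
    let new := pvRound graph r
    if new = [] then r else pvLoopC graph k (PySem.Set.update r new)

def find_connected_services_py_alt (graph : List (String × List String)) (start_service : String) (max_depth : Int) (services_list : List String) : List String :=
  let r := pvLoopC graph max_depth.toNat [start_service]
  PySem.Set.union [start_service]
    (PySem.Set.ofList (r.filter (fun n => services_list.contains n)))

-- ===== PRECONDITION & SPEC =====
def Spec_find_connected_services_py (graph : List (String × List String)) (start_service : String) (max_depth : Int) (services_list : List String) (out : List String) : Prop := out = find_connected_services_py_alt graph start_service max_depth services_list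
instance (graph : List (String × List String)) (start_service : String) (max_depth : Int) (services_list : List String) (out : List String) : Decidable (Spec_find_connected_services_py graph start_service max_depth services_list out) := by unfold Spec_find_connected_services_py; infer_instance

-- ===== CLAIM (what is proved, stated in full; the proofs are below) =====
def Claim_equal_find_connected_services_py : Prop := ∀ (graph : List (String × List String)) (start_service : String) (max_depth : Int) (services_list : List String), Dom_find_connected_services_py graph start_service max_depth services_list → Spec_find_connected_services_py graph start_service max_depth services_list (find_connected_services_py graph start_service max_depth services_list)

-- ===== LEMMAS AND PROOFS =====

-- ---- proof-side frontier machinery: A's queue loop seen one depth level at a time ----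

-- inner neighbour step over explicit (connected, visited, next_frontier) state
def pvInnerB (services_list : List String)
    (st : List String × List String × List String) (n : String) :
    List String × List String × List String :=
  if st.2.1.contains n then st
  else
    (if services_list.contains n then PySem.Set.add st.1 n else st.1,
     PySem.Set.add st.2.1 n,
     st.2.2 ++ [n])

def pvStepB (graph : List (String × List String)) (services_list : List String)
    (st : List String × List String × List String) (cur : String) :
    List String × List String × List String :=
  (pvNbrs graph cur).foldl (pvInnerB services_list) st

def pvLoopB (graph : List (String × List String)) (services_list : List String) :
    Nat → List String → List String → List String → List String
  | 0, c, _, _ => c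
  | k + 1, c, v, fr =>
    if fr = [] then c
    else
      let st := fr.foldl (pvStepB graph services_list) (c, v, [])
      pvLoopB graph services_list k st.1 st.2.1 st.2.2

theorem pvInner_corr (services_list : List String) (d : Int) :
    ∀ (ns : List String) (c v : List String) (q : List (String × Int)) (nf : List String),
      ns.foldl (pvInnerA services_list d) (c, v, q ++ nf.map (fun n => (n, d + 1))) =
        ((ns.foldl (pvInnerB services_list) (c, v, nf)).1,
         (ns.foldl (pvInnerB services_list) (c, v, nf)).2.1,
         q ++ (ns.foldl (pvInnerB services_list) (c, v, nf)).2.2.map (fun n => (n, d + 1))) := by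
  intro ns
  induction ns with
  | nil => intro c v q nf; simp
  | cons n ns ih =>
    intro c v q nf
    simp only [List.foldl_cons]
    by_cases hc : v.contains n
    · simp only [pvInnerA, pvInnerB, hc, if_true]
      exact ih c v q nf
    · simp only [pvInnerA, pvInnerB, hc]
      have : q ++ nf.map (fun n => (n, d + 1)) ++ [(n, d + 1)]
            = q ++ (nf ++ [n]).map (fun n => (n, d + 1)) := by
        simp [List.map_append]
      rw [this]
      exact ih _ _ q (nf ++ [n])

theorem pvLoopA_drain (graph : List (String × List String)) (max_depth : Int)
    (services_list : List String) :
    ∀ (q : List (String × Int)) (c v : List String),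
      (∀ p ∈ q, max_depth ≤ p.2) → pvLoopA graph max_depth services_list c v q = c := by
  intro q
  induction q with
  | nil => intro c v _; simp [pvLoopA]
  | cons p rest ih =>
    intro c v h
    obtain ⟨cur, depth⟩ := p
    have hd : max_depth ≤ depth := h (cur, depth) (by simp)
    rw [pvLoopA]
    simp only [hd, if_true]
    exact ih c v (fun p hp => h p (by simp [hp]))

theorem pvLoopA_level (graph : List (String × List String)) (max_depth : Int)
    (services_list : List String) (d : Int) (hd : ¬ max_depth ≤ d) :
    ∀ (fr : List String) (c v nf : List String),
      pvLoopA graph max_depth services_list c v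
          (fr.map (fun n => (n, d)) ++ nf.map (fun n => (n, d + 1))) =
        pvLoopA graph max_depth services_list
          (fr.foldl (pvStepB graph services_list) (c, v, nf)).1
          (fr.foldl (pvStepB graph services_list) (c, v, nf)).2.1
          ((fr.foldl (pvStepB graph services_list) (c, v, nf)).2.2.map (fun n => (n, d + 1))) := by
  intro fr
  induction fr with
  | nil => intro c v nf; simp
  | cons cur fr ih =>
    intro c v nf
    simp only [List.map_cons, List.cons_append]
    rw [pvLoopA]
    simp only [hd, if_false]
    rw [pvInner_corr services_list d (pvNbrs graph cur) c v
      (fr.map (fun n => (n, d))) nf]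
    simpa [pvStepB] using ih (pvNbrs graph cur |>.foldl (pvInnerB services_list) (c, v, nf)).1
      (pvNbrs graph cur |>.foldl (pvInnerB services_list) (c, v, nf)).2.1
      (pvNbrs graph cur |>.foldl (pvInnerB services_list) (c, v, nf)).2.2

theorem pvLoop_corr (graph : List (String × List String)) (max_depth : Int)
    (services_list : List String) :
    ∀ (k : Nat) (d : Int) (c v fr : List String), (max_depth - d).toNat = k →
      pvLoopA graph max_depth services_list c v (fr.map (fun n => (n, d))) =
        pvLoopB graph services_list k c v fr := by
  intro k
  induction k with
  | zero =>
    intro d c v fr hk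
    have hd : max_depth ≤ d := by omega
    rw [pvLoopB, pvLoopA_drain]
    intro p hp
    simp only [List.mem_map] at hp
    obtain ⟨n, _, rfl⟩ := hp
    exact hd
  | succ k ih =>
    intro d c v fr hk
    have hd : ¬ max_depth ≤ d := by omega
    rw [pvLoopB]
    by_cases hfr : fr = []
    · subst hfr
      simp [pvLoopA]
    · simp only [hfr, if_false]
      have := pvLoopA_level graph max_depth services_list d hd fr c v []
      simp only [List.map_nil, List.append_nil] at this
      rw [this]
      exact ih (d + 1) _ _ _ (by omega)

-- ---- generic facts about folding PySem.Set.add ----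

theorem pvMemFoldAdd :
    ∀ (a s : List String) (x : String), x ∈ s ∨ x ∈ a → x ∈ a.foldl PySem.Set.add s := by
  intro a
  induction a with
  | nil => intro s x hx; simpa using hx
  | cons y a ih =>
    intro s x hx
    simp only [List.foldl_cons]
    rcases hx with hx | hx
    · exact ih _ x (Or.inl ((PySem.Set.mem_add _ _ _).mpr (Or.inl hx)))
    · rcases List.mem_cons.mp hx with h | h
      · subst h
        exact ih _ x (Or.inl ((PySem.Set.mem_add _ _ _).mpr (Or.inr rfl)))
      · exact ih _ x (Or.inr h)

theorem pvAddFold (a : List String) (s : List String) (y : String) :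
    (PySem.Set.add a y).foldl PySem.Set.add s = PySem.Set.add (a.foldl PySem.Set.add s) y := by
  by_cases hy : y ∈ a
  · rw [PySem.Set.add_of_mem hy, PySem.Set.add_of_mem (pvMemFoldAdd a s y (Or.inr hy))]
  · rw [PySem.Set.add_of_not_mem hy, List.foldl_append, List.foldl_cons, List.foldl_nil]

theorem pvSwap :
    ∀ (l a s : List String),
      (l.foldl PySem.Set.add a).foldl PySem.Set.add s = l.foldl PySem.Set.add (a.foldl PySem.Set.add s) := by
  intro l
  induction l with
  | nil => intro a s; rfl
  | cons y l ih =>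
    intro a s
    simp only [List.foldl_cons]
    rw [ih (PySem.Set.add a y) s, pvAddFold]

theorem pvUpdateOfList (s l : List String) :
    PySem.Set.update s (PySem.Set.ofList l) = l.foldl PySem.Set.add s := by
  simp only [PySem.Set.update, PySem.Set.ofList, PySem.Set.empty]
  rw [pvSwap, List.foldl_nil]

theorem pvUpdateDisj :
    ∀ (new r : List String), new.Nodup → (∀ x ∈ new, x ∉ r) →
      PySem.Set.update r new = r ++ new := by
  intro new
  induction new with
  | nil => intro r _ _; simp [PySem.Set.update]
  | cons x new ih =>
    intro r hnd hdisj
    have hx : x ∉ r := hdisj x (by simp)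
    simp only [PySem.Set.update, List.foldl_cons]
    rw [PySem.Set.add_of_not_mem hx]
    have := ih (r ++ [x]) (List.nodup_cons.mp hnd).2 ?_
    · simpa [PySem.Set.update, List.append_assoc] using this
    · intro y hy hmem
      rcases List.mem_append.mp hmem with h1 | h1
      · exact hdisj y (by simp [hy]) h1
      · simp only [List.mem_singleton] at h1
        subst h1
        exact (List.nodup_cons.mp hnd).1 hy

-- ---- facts about B's round fold ----

theorem pvInnerC_mono (r : List String) :
    ∀ (ns new : List String) (x : String), x ∈ new → x ∈ ns.foldl (pvInnerC r) new := by
  intro ns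
  induction ns with
  | nil => intro new x hx; exact hx
  | cons n ns ih =>
    intro new x hx
    simp only [List.foldl_cons]
    refine ih _ x ?_
    simp only [pvInnerC]
    split
    · exact hx
    · exact (PySem.Set.mem_add _ _ _).mpr (Or.inl hx)

theorem pvInnerC_mem (r : List String) :
    ∀ (ns new : List String) (n : String), n ∈ ns → n ∈ r ++ ns.foldl (pvInnerC r) new := by
  intro ns
  induction ns with
  | nil => intro new n hn; simp at hn
  | cons m ns ih =>
    intro new n hn
    rcases List.mem_cons.mp hn with h | h
    · subst h
      by_cases hr : n ∈ r
      · exact List.mem_append.mpr (Or.inl hr)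
      · have hrc : r.contains n = false := by simp [List.contains_eq_mem, hr]
        simp only [List.foldl_cons, pvInnerC, hrc, Bool.false_eq_true, if_false]
        refine List.mem_append.mpr (Or.inr ?_)
        exact pvInnerC_mono r ns _ n ((PySem.Set.mem_add _ _ _).mpr (Or.inr rfl))
    · simp only [List.foldl_cons]
      exact ih _ n h

theorem pvRoundStep_mono (graph : List (String × List String)) (r : List String) :
    ∀ (l new : List String) (x : String), x ∈ new → x ∈ l.foldl (pvRoundStep graph r) new := by
  intro l
  induction l with
  | nil => intro new x hx; exact hx
  | cons s l ih =>
    intro new x hx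
    simp only [List.foldl_cons]
    exact ih _ x (pvInnerC_mono r _ new x hx)

theorem pvRound_mem (graph : List (String × List String)) (r : List String) :
    ∀ (l new : List String), ∀ s ∈ l, ∀ n ∈ pvNbrs graph s,
      n ∈ r ++ l.foldl (pvRoundStep graph r) new := by
  intro l
  induction l with
  | nil => intro new s hs; simp at hs
  | cons t l ih =>
    intro new s hs n hn
    rcases List.mem_cons.mp hs with h | h
    · subst h
      simp only [List.foldl_cons, pvRoundStep]
      have := pvInnerC_mem r (pvNbrs graph s) new n hn
      rcases List.mem_append.mp this with h1 | h1
      · exact List.mem_append.mpr (Or.inl h1)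
      · exact List.mem_append.mpr (Or.inr (pvRoundStep_mono graph r l _ n h1))
    · simp only [List.foldl_cons]
      exact ih _ s h n hn

theorem pvInnerC_invar (r : List String) :
    ∀ (ns new : List String), new.Nodup → (∀ x ∈ new, x ∉ r) →
      (ns.foldl (pvInnerC r) new).Nodup ∧ (∀ x ∈ ns.foldl (pvInnerC r) new, x ∉ r) := by
  intro ns
  induction ns with
  | nil => intro new h1 h2; exact ⟨h1, h2⟩
  | cons n ns ih =>
    intro new h1 h2
    simp only [List.foldl_cons, pvInnerC]
    by_cases hr : r.contains n = true
    · simp only [hr, if_true]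
      exact ih new h1 h2
    · simp only [hr, Bool.false_eq_true, if_false]
      refine ih _ (PySem.Set.nodup_add new n h1) ?_
      intro x hx
      rcases (PySem.Set.mem_add _ _ _).mp hx with h | h
      · exact h2 x h
      · subst h
        simpa [List.contains_eq_mem] using hr

theorem pvRound_invar (graph : List (String × List String)) (r : List String) :
    ∀ (l new : List String), new.Nodup → (∀ x ∈ new, x ∉ r) →
      (l.foldl (pvRoundStep graph r) new).Nodup ∧
        (∀ x ∈ l.foldl (pvRoundStep graph r) new, x ∉ r) := by
  intro l
  induction l with
  | nil => intro new h1 h2; exact ⟨h1, h2⟩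
  | cons s l ih =>
    intro new h1 h2
    simp only [List.foldl_cons, pvRoundStep]
    obtain ⟨h1', h2'⟩ := pvInnerC_invar r (pvNbrs graph s) new h1 h2
    exact ih _ h1' h2'

theorem pvInnerC_noop (r : List String) :
    ∀ (ns new : List String), (∀ n ∈ ns, n ∈ r) → ns.foldl (pvInnerC r) new = new := by
  intro ns
  induction ns with
  | nil => intro new _; rfl
  | cons n ns ih =>
    intro new h
    have : r.contains n = true := by simp [List.contains_eq_mem, h n (by simp)]
    simp only [List.foldl_cons, pvInnerC, this, if_true]
    exact ih new (fun m hm => h m (by simp [hm]))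

theorem pvRound_noop (graph : List (String × List String)) (r : List String) :
    ∀ (p new : List String), (∀ s ∈ p, ∀ n ∈ pvNbrs graph s, n ∈ r) →
      p.foldl (pvRoundStep graph r) new = new := by
  intro p
  induction p with
  | nil => intro new _; rfl
  | cons s p ih =>
    intro new h
    simp only [List.foldl_cons, pvRoundStep]
    rw [pvInnerC_noop r _ new (h s (by simp))]
    exact ih new (fun t ht => h t (by simp [ht]))

-- ---- correspondence: one frontier fold of the level view = one round of B over the fixed set r ----

theorem pvInner_CB (sl r : List String) :
    ∀ (ns new b : List String),
      ns.foldl (pvInnerB sl)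
        (((r ++ new).filter (fun m => sl.contains m)).foldl PySem.Set.add b, r ++ new, new) =
      (((r ++ ns.foldl (pvInnerC r) new).filter (fun m => sl.contains m)).foldl PySem.Set.add b,
        r ++ ns.foldl (pvInnerC r) new, ns.foldl (pvInnerC r) new) := by
  intro ns
  induction ns with
  | nil => intro new b; rfl
  | cons n ns ih =>
    intro new b
    by_cases hr : n ∈ r
    · have h1 : (r ++ new).contains n = true := by simp [List.contains_eq_mem, hr]
      have h2 : r.contains n = true := by simp [List.contains_eq_mem, hr]
      simp only [List.foldl_cons, pvInnerB, pvInnerC, h1, h2, if_true]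
      exact ih new b
    · by_cases hn : n ∈ new
      · have h1 : (r ++ new).contains n = true := by simp [List.contains_eq_mem, hn]
        have h2 : r.contains n = false := by simp [List.contains_eq_mem, hr]
        simp only [List.foldl_cons, pvInnerB, pvInnerC, h1, h2, if_true, Bool.false_eq_true,
          if_false]
        rw [PySem.Set.add_of_mem hn]
        exact ih new b
      · have h1 : (r ++ new).contains n = false := by
          simp [List.contains_eq_mem, List.mem_append, hr, hn]
        have h2 : r.contains n = false := by simp [List.contains_eq_mem, hr]
        have hnm : n ∉ r ++ new := by simp [hr, hn]
        simp only [List.foldl_cons, pvInnerB, pvInnerC, h1, h2, Bool.false_eq_true, if_false]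
        rw [PySem.Set.add_of_not_mem hnm, PySem.Set.add_of_not_mem hn]
        have hc : (if sl.contains n = true
              then PySem.Set.add (((r ++ new).filter (fun m => sl.contains m)).foldl
                PySem.Set.add b) n
              else ((r ++ new).filter (fun m => sl.contains m)).foldl PySem.Set.add b)
            = ((r ++ new ++ [n]).filter (fun m => sl.contains m)).foldl PySem.Set.add b := by
          rw [List.filter_append (r ++ new) [n]]
          by_cases hq : sl.contains n = true
          · simp only [List.filter_cons, hq, if_true, List.filter_nil, List.foldl_append,
              List.foldl_cons, List.foldl_nil]
          · simp only [List.filter_cons, hq, Bool.false_eq_true, if_false, List.filter_nil,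
              List.append_nil]
        rw [hc]
        have hassoc : r ++ new ++ [n] = r ++ (new ++ [n]) := by simp
        rw [hassoc]
        exact ih (new ++ [n]) b

theorem pvOut_CB (graph : List (String × List String)) (sl r : List String) :
    ∀ (fr new b : List String),
      fr.foldl (pvStepB graph sl)
        (((r ++ new).filter (fun m => sl.contains m)).foldl PySem.Set.add b, r ++ new, new) =
      (((r ++ fr.foldl (pvRoundStep graph r) new).filter (fun m => sl.contains m)).foldl
          PySem.Set.add b,
        r ++ fr.foldl (pvRoundStep graph r) new, fr.foldl (pvRoundStep graph r) new) := by
  intro fr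
  induction fr with
  | nil => intro new b; rfl
  | cons cur fr ih =>
    intro new b
    simp only [List.foldl_cons, pvStepB, pvRoundStep]
    rw [pvInner_CB sl r (pvNbrs graph cur) new b]
    exact ih _ b

-- pvLoopB ignores the frontier argument when it is empty
theorem pvLoopB_nil (graph : List (String × List String)) (sl : List String) :
    ∀ (k : Nat) (c v : List String), pvLoopB graph sl k c v [] = c := by
  intro k
  cases k with
  | zero => intro c v; rfl
  | succ k => intro c v; simp [pvLoopB]

-- main simulation: the frontier view of A equals B's whole-set rounds
theorem pvSim (graph : List (String × List String)) (sl : List String) :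
    ∀ (k : Nat) (p fr b : List String),
      (∀ s ∈ p, ∀ n ∈ pvNbrs graph s, n ∈ p ++ fr) →
      pvLoopB graph sl k
          (((p ++ fr).filter (fun m => sl.contains m)).foldl PySem.Set.add b) (p ++ fr) fr =
        ((pvLoopC graph k (p ++ fr)).filter (fun m => sl.contains m)).foldl PySem.Set.add b := by
  intro k
  induction k with
  | zero => intro p fr b _; rfl
  | succ k ih =>
    intro p fr b hp
    have hround : pvRound graph (p ++ fr) = fr.foldl (pvRoundStep graph (p ++ fr)) [] := by
      show (p ++ fr).foldl (pvRoundStep graph (p ++ fr)) [] = _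
      rw [List.foldl_append, pvRound_noop graph (p ++ fr) p [] hp]
    have hC : pvLoopC graph (k + 1) (p ++ fr)
        = if pvRound graph (p ++ fr) = [] then p ++ fr
          else pvLoopC graph k (PySem.Set.update (p ++ fr) (pvRound graph (p ++ fr))) := rfl
    by_cases hfr : fr = []
    · subst hfr
      have hnew : pvRound graph (p ++ []) = [] := by rw [hround]; rfl
      rw [pvLoopB]
      simp only [if_true]
      rw [hC]
      simp only [hnew, if_true]
    · rw [pvLoopB]
      simp only [hfr, if_false]
      have hout := pvOut_CB graph sl (p ++ fr) fr [] b
      simp only [List.append_nil] at hout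
      rw [hout, hC, ← hround]
      by_cases hnew : pvRound graph (p ++ fr) = []
      · simp only [hnew, if_true, List.append_nil]
        exact pvLoopB_nil graph sl k _ _
      · simp only [hnew, if_false]
        have hinv := pvRound_invar graph (p ++ fr) fr [] List.nodup_nil (by simp)
        rw [← hround] at hinv
        have hupd : PySem.Set.update (p ++ fr) (pvRound graph (p ++ fr))
            = (p ++ fr) ++ pvRound graph (p ++ fr) :=
          pvUpdateDisj _ _ hinv.1 hinv.2
        rw [hupd]
        have hmem : ∀ s ∈ p ++ fr, ∀ n ∈ pvNbrs graph s,
            n ∈ (p ++ fr) ++ pvRound graph (p ++ fr) := by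
          intro s hs n hn
          rcases List.mem_append.mp hs with h | h
          · exact List.mem_append.mpr (Or.inl (hp s h n hn))
          · rw [hround]
            exact pvRound_mem graph (p ++ fr) fr [] s h n hn
        exact ih (p ++ fr) (pvRound graph (p ++ fr)) b hmem

-- ===== VERDICT (by name: the statement is the Claim_ definition above) =====
theorem find_connected_services_py_spec : Claim_equal_find_connected_services_py := by
  intro graph start_service max_depth services_list _
  unfold Spec_find_connected_services_py find_connected_services_py find_connected_services_py_alt
  have hA := pvLoop_corr graph max_depth services_list max_depth.toNat 0
    [start_service] [start_service] [start_service] (by omega)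
  simp only [List.map_cons, List.map_nil] at hA
  have hc : (([start_service] : List String).filter
        (fun m => services_list.contains m)).foldl PySem.Set.add [start_service]
      = [start_service] := by
    by_cases hq : services_list.contains start_service = true
    · simp only [List.filter_cons, hq, if_true, List.filter_nil, List.foldl_cons, List.foldl_nil]
      exact PySem.Set.add_of_mem (by simp)
    · simp only [List.filter_cons, hq, Bool.false_eq_true, if_false, List.filter_nil,
        List.foldl_nil]
  have hsim := pvSim graph services_list max_depth.toNat [] [start_service] [start_service]
    (by simp)
  simp only [List.nil_append] at hsim
  rw [hc] at hsim
  rw [hA, hsim]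
  show _ = PySem.Set.union [start_service]
    (PySem.Set.ofList ((pvLoopC graph max_depth.toNat [start_service]).filter
      (fun n => services_list.contains n)))
  unfold PySem.Set.union
  rw [pvUpdateOfList]
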